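-- pv_equiv track=rewrite | github.com/qiliRedHat/ocp-performance-analyzer-mcp | elt/etcd/etcd_analyzer_elt_bottleneck.py | _assess_category_severity
-- ===== SOURCE A (Python) =====
-- from typing import Dict, Any, List, Optional, Union
--
-- def _assess_category_severity(bottlenecks: List[Dict[str, Any]]) -> str:
--     """Assess overall severity for a category of bottlenecks"""
--     if not bottlenecks:
--         return '<span class="badge badge-success">None</span>'
--
--     severities = [b.get('severity', '').lower() for b in bottlenecks]
--
--     if 'critical' in severities or 'high' in severities:
--         return '<span class="badge badge-danger">Critical</span>'
--     elif 'medium' in severities: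
--         return '<span class="badge badge-warning">Medium</span>'
--     elif 'low' in severities:
--         return '<span class="badge badge-info">Low</span>'
--     else:
--         return '<span class="badge badge-secondary">Unknown</span>'
-- ===== SOURCE B (Python) =====
-- def _assess_category_severity(bottlenecks):
--     """Assess overall severity for a category of bottlenecks (single-pass max-rank)."""
--     if not bottlenecks:
--         return '<span class="badge badge-success">None</span>'
--     rank = 0
--     for b in bottlenecks:
--         s = b.get('severity', '').lower()
--         if s == 'critical' or s == 'high':
--             r = 3
--         elif s == 'medium':
--             r = 2
--         elif s == 'low':
--             r = 1
--         else:
--             r = 0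
--         if r > rank:
--             rank = r
--     return ['<span class="badge badge-secondary">Unknown</span>',
--             '<span class="badge badge-info">Low</span>',
--             '<span class="badge badge-warning">Medium</span>',
--             '<span class="badge badge-danger">Critical</span>'][rank]
-- ===== Notes on version B (the rewrite author's own statement) =====
-- stated objective: alternative
-- what changed: Replaced the build-a-severities-list-then-four-membership-scans with a single fold that keeps a running maximum severity rank (critical/high=3, medium=2, low=1, else 0) and indexes a badge table with the final rank.
import Mathlib
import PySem

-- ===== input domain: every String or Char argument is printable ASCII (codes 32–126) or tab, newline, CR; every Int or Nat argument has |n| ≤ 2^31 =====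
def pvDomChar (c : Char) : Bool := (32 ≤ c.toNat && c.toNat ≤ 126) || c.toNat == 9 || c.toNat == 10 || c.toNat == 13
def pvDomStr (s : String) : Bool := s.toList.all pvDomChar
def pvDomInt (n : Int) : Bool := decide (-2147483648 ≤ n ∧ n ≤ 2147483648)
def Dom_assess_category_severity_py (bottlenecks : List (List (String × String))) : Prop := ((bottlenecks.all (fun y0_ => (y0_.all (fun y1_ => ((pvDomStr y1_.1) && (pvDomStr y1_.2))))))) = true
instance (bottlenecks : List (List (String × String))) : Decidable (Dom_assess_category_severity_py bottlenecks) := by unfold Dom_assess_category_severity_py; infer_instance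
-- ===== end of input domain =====

-- B replaces A's build-list-then-four-membership-scans by a single fold keeping a running max rank; alternative decomposition, same cost.

-- ===== PORT A =====
-- severity string of one bottleneck dict: b.get('severity', '').lower()
def pvSevStr (b : List (String × String)) : String :=
  PySem.Str.lower ((PySem.Dict.mk b).getD "severity" "")

def assess_category_severity_py (bottlenecks : List (List (String × String))) : String :=
  if bottlenecks = [] then "<span class=\"badge badge-success\">None</span>"
  else
    let severities := bottlenecks.map pvSevStr
    if severities.contains "critical" || severities.contains "high" then
      "<span class=\"badge badge-danger\">Critical</span>"
    else if severities.contains "medium" then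
      "<span class=\"badge badge-warning\">Medium</span>"
    else if severities.contains "low" then
      "<span class=\"badge badge-info\">Low</span>"
    else
      "<span class=\"badge badge-secondary\">Unknown</span>"

-- ===== PORT B =====
-- rank of one bottleneck, as in Source B's loop body
def pvRank (b : List (String × String)) : Nat :=
  let s := pvSevStr b  -- s = b.get('severity', '').lower()
  if s = "critical" ∨ s = "high" then 3
  else if s = "medium" then 2
  else if s = "low" then 1
  else 0

def pvBadges : List String :=
  ["<span class=\"badge badge-secondary\">Unknown</span>",
   "<span class=\"badge badge-info\">Low</span>",
   "<span class=\"badge badge-warning\">Medium</span>",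
   "<span class=\"badge badge-danger\">Critical</span>"]

def assess_category_severity_py_alt (bottlenecks : List (List (String × String))) : String :=
  if bottlenecks = [] then "<span class=\"badge badge-success\">None</span>"
  else
    let rank := bottlenecks.foldl (fun acc b => if pvRank b > acc then pvRank b else acc) 0
    pvBadges.getD rank ""

-- ===== PRECONDITION & SPEC =====
def Spec_assess_category_severity_py (bottlenecks : List (List (String × String))) (out : String) : Prop := out = assess_category_severity_py_alt bottlenecks
instance (bottlenecks : List (List (String × String))) (out : String) : Decidable (Spec_assess_category_severity_py bottlenecks out) := by unfold Spec_assess_category_severity_py; infer_instance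

-- ===== CLAIM (what is proved, stated in full; the proofs are below) =====
def Claim_equal_assess_category_severity_py : Prop := ∀ (bottlenecks : List (List (String × String))), Dom_assess_category_severity_py bottlenecks → Spec_assess_category_severity_py bottlenecks (assess_category_severity_py bottlenecks)

-- ===== LEMMAS AND PROOFS =====

-- the value A's membership chain computes, as a rank
def pvChainRank (bs : List (List (String × String))) : Nat :=
  let severities := bs.map pvSevStr
  if severities.contains "critical" || severities.contains "high" then 3
  else if severities.contains "medium" then 2
  else if severities.contains "low" then 1
  else 0

theorem pvChainRank_cons (b : List (String × String)) (bs : List (List (String × String))) :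
    pvChainRank (b :: bs) = max (pvRank b) (pvChainRank bs) := by
  unfold pvChainRank pvRank
  simp only [List.map_cons, List.contains_cons]
  generalize (bs.map pvSevStr).contains "critical" = c1
  generalize (bs.map pvSevStr).contains "high" = c2
  generalize (bs.map pvSevStr).contains "medium" = c3
  generalize (bs.map pvSevStr).contains "low" = c4
  by_cases h1 : pvSevStr b = "critical" <;>
  by_cases h2 : pvSevStr b = "high" <;>
  by_cases h3 : pvSevStr b = "medium" <;>
  by_cases h4 : pvSevStr b = "low" <;>
  cases c1 <;> cases c2 <;> cases c3 <;> cases c4 <;>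
    simp_all [@eq_comm String] <;> split_ifs <;> omega

theorem pvFold_eq_chain (bs : List (List (String × String))) (a : Nat) :
    bs.foldl (fun acc b => if pvRank b > acc then pvRank b else acc) a = max a (pvChainRank bs) := by
  induction bs generalizing a with
  | nil => simp [pvChainRank]
  | cons b bs ih =>
      rw [List.foldl_cons, ih, pvChainRank_cons]
      split_ifs <;> omega

theorem pvChainRank_le (bs : List (List (String × String))) : pvChainRank bs ≤ 3 := by
  unfold pvChainRank; dsimp only; split_ifs <;> omega

-- ===== VERDICT (by name: the statement is the Claim_ definition above) =====
theorem assess_category_severity_py_spec : Claim_equal_assess_category_severity_py := by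
  intro bs _
  unfold Spec_assess_category_severity_py assess_category_severity_py assess_category_severity_py_alt
  by_cases hnil : bs = []
  · simp [hnil]
  · simp only [hnil, if_false]
    rw [pvFold_eq_chain, Nat.zero_max]
    have h3 := pvChainRank_le bs
    unfold pvChainRank
    dsimp only
    split_ifs <;> rfl
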